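-- pv_equiv track=rewrite | github.com/equinor/ert | res/config/rangestring.py | rangestring_to_mask
-- ===== SOURCE A (Python) =====
-- from typing import Collection, List, Optional, Union
--
-- def rangestring_to_mask(rangestring: str, length: int) -> List[bool]:
--     """Convert a string specifying ranges of elements, and the number of elements,
--     into a list of booleans. The ranges are end-inclusive."""
--     mask = [False] * length
--     if rangestring == "":
--         # An empty string means no active indecies. Note that an
--         # IndexRange-typed instance being None means the opposite
--         return mask
--     for _range in rangestring.split(","):
--         if "-" in _range:
--             if len(_range.strip().split("-")) != 2:
--                 raise ValueError(f"Wrong range syntax {_range}")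
--             start, end = map(int, _range.strip().split("-"))
--             if end < start:
--                 raise ValueError(f"Range {start}-{end} has invalid direction")
--             if end + 1 > length:
--                 raise ValueError(
--                     f"Range endpoint {end} is beyond the mask length {length} "
--                 )
--             mask[start : end + 1] = [True] * (end + 1 - start)
--         elif _range:
--             if int(_range) + 1 > length:
--                 raise ValueError(
--                     f"Realization index {_range} is beyond the mask length {length} "
--                 )
--             mask[int(_range)] = True
--     return mask
-- ===== SOURCE B (Python) =====
-- def _mark(diff, start, end):
--     """Record the end-inclusive interval [start, end] as +1/-1 endpoint events."""
--     diff[start] += 1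
--     diff[end + 1] -= 1
--
--
-- def rangestring_to_mask(rangestring, length):
--     """Convert a string specifying ranges of elements, and the number of elements,
--     into a list of booleans. The ranges are end-inclusive."""
--     diff = [0] * (length + 1)
--     for _range in rangestring.split(","):
--         if "-" in _range:
--             parts = _range.strip().split("-")
--             if len(parts) != 2:
--                 raise ValueError(f"Wrong range syntax {_range}")
--             start, end = int(parts[0]), int(parts[1])
--             if end < start:
--                 raise ValueError(f"Range {start}-{end} has invalid direction")
--             if end + 1 > length:
--                 raise ValueError(
--                     f"Range endpoint {end} is beyond the mask length {length} "
--                 )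
--             _mark(diff, start, end)
--         elif _range:
--             idx = int(_range)
--             if idx + 1 > length:
--                 raise ValueError(
--                     f"Realization index {_range} is beyond the mask length {length} "
--                 )
--             _mark(diff, idx, idx)
--     mask = []
--     running = 0
--     for i in range(length):
--         running += diff[i]
--         mask.append(running > 0)
--     return mask
-- ===== Notes on version B (the rewrite author's own statement) =====
-- stated objective: alternative
-- what changed: Instead of allocating a [False]*length list and mutating it with a slice assignment or index write per token, B records each validated token as +1/-1 endpoint events in a difference array and emits the mask in one prefix-sum pass over range(length) as running > 0; the empty-string early return disappears because the token loop handles it naturally.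
import Mathlib
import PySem

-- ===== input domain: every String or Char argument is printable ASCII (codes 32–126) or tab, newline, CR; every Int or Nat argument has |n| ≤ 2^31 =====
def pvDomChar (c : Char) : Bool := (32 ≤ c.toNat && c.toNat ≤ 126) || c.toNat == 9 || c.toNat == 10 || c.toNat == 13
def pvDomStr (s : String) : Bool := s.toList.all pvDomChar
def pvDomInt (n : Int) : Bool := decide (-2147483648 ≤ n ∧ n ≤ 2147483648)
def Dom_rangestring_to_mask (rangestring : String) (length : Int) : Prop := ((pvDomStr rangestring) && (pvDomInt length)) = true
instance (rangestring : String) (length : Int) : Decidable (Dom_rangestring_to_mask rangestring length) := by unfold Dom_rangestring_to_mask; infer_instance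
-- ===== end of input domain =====

-- B replaces A's in-place boolean-mask mutation (a slice assignment / index write per token)
-- by a difference-array sweep: each validated token records +1/-1 endpoint events and a single
-- prefix-sum pass over range(length) emits running > 0; alternative decomposition, no speed claim.


-- ===== PORT A =====
-- one iteration of A's token loop; `none` = the ValueError A raises there
def pvStepA (length : Int) (mask? : Option (List Bool)) (t : List Char) : Option (List Bool) :=
  match mask? with
  | none => none
  | some mask =>
    if PySem.Chars.isIn ['-'] t then
      let parts := PySem.Chars.splitOn (PySem.Chars.strip t) ['-']
      if parts.length ≠ 2 then none            -- Wrong range syntax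
      else
        match PySem.Int.ofChars? (parts.getD 0 []), PySem.Int.ofChars? (parts.getD 1 []) with
        | some s, some e =>
          if e < s then none                   -- invalid direction
          else if e + 1 > length then none     -- endpoint beyond mask length
          else some (PySem.List.slice mask none (some s) ++
                     PySem.List.pyRepeat [true] (e + 1 - s) ++
                     PySem.List.slice mask (some (e + 1)) none)   -- mask[start:end+1] = [True]*(end+1-start)
        | _, _ => none                         -- int() ValueError
    else if t ≠ [] then
      match PySem.Int.ofChars? t with
      | some v =>
        if v + 1 > length then none            -- index beyond mask length
        else PySem.List.pySet? mask v true     -- mask[int(_range)] = True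
      | none => none                           -- int() ValueError
    else some mask

def rangestring_to_mask (rangestring : String) (length : Int) : List Bool :=
  let mask := PySem.List.pyRepeat [false] length
  if rangestring = "" then mask
  else
    ((PySem.Chars.splitOn rangestring.toList [',']).foldl (pvStepA length) (some mask)).getD []

-- ===== PORT B =====
-- _mark(diff, start, end): diff[start] += 1; diff[end + 1] -= 1 (`none` = IndexError; never hit under Pre_)
def pvMark? (diff : List Int) (start fin : Int) : Option (List Int) :=
  match PySem.List.pyGet? diff start with
  | none => none
  | some v =>
    match PySem.List.pySet? diff start (v + 1) with
    | none => none
    | some d1 =>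
      match PySem.List.pyGet? d1 (fin + 1) with
      | none => none
      | some w => PySem.List.pySet? d1 (fin + 1) (w - 1)

-- one iteration of B's token loop over the difference array; `none` = ValueError
def pvStepB (length : Int) (acc? : Option (List Int)) (t : List Char) : Option (List Int) :=
  match acc? with
  | none => none
  | some diff =>
    if PySem.Chars.isIn ['-'] t then
      let parts := PySem.Chars.splitOn (PySem.Chars.strip t) ['-']
      if parts.length ≠ 2 then none
      else
        match PySem.Int.ofChars? (parts.getD 0 []), PySem.Int.ofChars? (parts.getD 1 []) with
        | some s, some e =>
          if e < s then none
          else if e + 1 > length then none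
          else pvMark? diff s e                -- _mark(diff, start, end)
        | _, _ => none
    else if t ≠ [] then
      match PySem.Int.ofChars? t with
      | some v =>
        if v + 1 > length then none
        else pvMark? diff v v                  -- _mark(diff, idx, idx)
      | none => none
    else some diff

def rangestring_to_mask_alt (rangestring : String) (length : Int) : List Bool :=
  match (PySem.Chars.splitOn rangestring.toList [',']).foldl (pvStepB length)
      (some (PySem.List.pyRepeat [0] (length + 1))) with
  | none => []
  | some diff =>
    -- prefix-sum pass: running += diff[i]; mask.append(running > 0)
    -- (pyGetD is exact here: under Pre_ the loop index i satisfies 0 ≤ i < length + 1 = len(diff))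
    ((PySem.List.pyRange 0 length 1).foldl
      (fun (st : Int × List Bool) i =>
        let r := st.1 + PySem.List.pyGetD diff i 0
        (r, st.2 ++ [decide (r > 0)])) ((0 : Int), ([] : List Bool))).2

-- ===== PRECONDITION & SPEC =====
-- a token is accepted by A's loop (the parsed values are necessarily nonnegative: no '-' survives the splits)
def pvTokOK (length : Int) (t : List Char) : Bool :=
  if PySem.Chars.isIn ['-'] t then
    let parts := PySem.Chars.splitOn (PySem.Chars.strip t) ['-']
    parts.length == 2 &&
      (match PySem.Int.ofChars? (parts.getD 0 []), PySem.Int.ofChars? (parts.getD 1 []) with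
       | some s, some e => decide (0 ≤ s) && decide (s ≤ e) && decide (e + 1 ≤ length)
       | _, _ => false)
  else if t ≠ [] then
    match PySem.Int.ofChars? t with
    | some v => decide (0 ≤ v) && decide (v + 1 ≤ length)
    | none => false
  else true

-- Pre_ excludes exactly the inputs on which A raises ValueError (malformed token, bad int,
-- inverted range, endpoint/index beyond the mask length); B raises the same errors there.
def Pre_rangestring_to_mask (rangestring : String) (length : Int) : Prop :=
  ((PySem.Chars.splitOn rangestring.toList [',']).all (pvTokOK length)) = true
instance (rangestring : String) (length : Int) : Decidable (Pre_rangestring_to_mask rangestring length) := by unfold Pre_rangestring_to_mask; infer_instance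

def pvWitness_rangestring_to_mask : String × Int := ("0,2-4, 6", 8)

def Spec_rangestring_to_mask (rangestring : String) (length : Int) (out : List Bool) : Prop := out = rangestring_to_mask_alt rangestring length
instance (rangestring : String) (length : Int) (out : List Bool) : Decidable (Spec_rangestring_to_mask rangestring length out) := by unfold Spec_rangestring_to_mask; infer_instance

-- ===== CLAIM (what is proved, stated in full; the proofs are below) =====
def Claim_equal_rangestring_to_mask : Prop := ∀ (rangestring : String) (length : Int), Dom_rangestring_to_mask rangestring length → Pre_rangestring_to_mask rangestring length → Spec_rangestring_to_mask rangestring length (rangestring_to_mask rangestring length)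

-- ===== LEMMAS AND PROOFS =====

-- prefix sum of the first n entries of the difference array
def pvPsum0 (d : List Int) (n : Nat) : Int := (d.take n).sum
-- prefix sum through index k (inclusive) = B's `running` after the iteration i = k
def pvPsum (d : List Int) (k : Nat) : Int := pvPsum0 d (k + 1)

theorem pvPsum0_succ (d : List Int) (n : Nat) :
    pvPsum0 d (n + 1) = pvPsum0 d n + d.getD n 0 := by
  unfold pvPsum0
  rw [List.take_add_one, List.sum_append]
  cases h : d[n]? with
  | none => simp [List.getD, h]
  | some v => simp [List.getD, h]

theorem pvGetD_set (d : List Int) (j : Nat) (v : Int) (i : Nat) :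
    (d.set j v).getD i 0 = if i = j ∧ j < d.length then v else d.getD i 0 := by
  simp only [List.getD, List.getElem?_set]
  split_ifs with h1 h2 h3 h3 <;> simp_all

theorem pvPsum0_set (d : List Int) (j : Nat) (v : Int) (hj : j < d.length) (n : Nat) :
    pvPsum0 (d.set j v) n = pvPsum0 d n + (if j < n then v - d.getD j 0 else 0) := by
  induction n with
  | zero => simp [pvPsum0]
  | succ n ih =>
    rw [pvPsum0_succ, pvPsum0_succ, ih, pvGetD_set]
    by_cases hnj : n = j
    · subst hnj; split_ifs <;> omega
    · split_ifs <;> omega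

-- effect of _mark on every prefix sum: +1 exactly on the covered indices
theorem pvMark?_spec (d : List Int) (s e length : Int)
    (hd : d.length = (length + 1).toNat) (h0 : 0 ≤ s) (hse : s ≤ e) (hel : e + 1 ≤ length) :
    ∃ d', pvMark? d s e = some d' ∧ d'.length = d.length ∧
      ∀ k : Nat, pvPsum d' k = pvPsum d k + (if s ≤ (k : Int) ∧ (k : Int) ≤ e then 1 else 0) := by
  have hlen : d.length = (length + 1).toNat := hd
  have hsl : s.toNat < d.length := by omega
  have hel' : (e + 1).toNat < d.length := by omega
  have hs : s = ((s.toNat : Nat) : Int) := by omega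
  have he1 : e + 1 = (((e + 1).toNat : Nat) : Int) := by omega
  have hel2 : (e + 1).toNat < (d.set s.toNat (d[s.toNat] + 1)).length := by
    simpa using hel'
  unfold pvMark?
  rw [hs, he1]
  simp only [PySem.List.pyGet?_natCast, List.getElem?_eq_getElem hsl,
    PySem.List.pySet?_natCast _ _ _ hsl, List.getElem?_eq_getElem hel2,
    PySem.List.pySet?_natCast _ _ _ hel2]
  refine ⟨_, rfl, by simp, ?_⟩
  intro k
  have hget1 : d.getD s.toNat 0 = d[s.toNat] := List.getD_eq_getElem d 0 hsl
  have hget2 : (d.set s.toNat (d[s.toNat] + 1)).getD (e + 1).toNat 0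
      = (d.set s.toNat (d[s.toNat] + 1))[(e + 1).toNat] := List.getD_eq_getElem _ 0 hel2
  unfold pvPsum
  rw [pvPsum0_set _ _ _ hel2, pvPsum0_set _ _ _ hsl, hget1, hget2]
  split_ifs <;> omega

-- the invariant tying A's boolean mask to B's difference array
def pvInv (length : Int) (mask : List Bool) (d : List Int) : Prop :=
  d.length = (length + 1).toNat ∧ (∀ k : Nat, 0 ≤ pvPsum d k) ∧
    mask = (List.range length.toNat).map (fun k => decide (0 < pvPsum d k))

-- splicing [take a, replicate (b-a) true, drop b] into a pointwise-described mask
theorem pvSplice (n a b : Nat) (hab : a ≤ b) (hbn : b ≤ n) (g g' : Nat → Bool)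
    (h1 : ∀ i, i < a → g' i = g i)
    (h2 : ∀ i, a ≤ i → i < b → g' i = true)
    (h3 : ∀ i, b ≤ i → i < n → g' i = g i) :
    ((List.range n).map g).take a ++
      (List.replicate (b - a) true ++ ((List.range n).map g).drop b)
      = (List.range n).map g' := by
  apply List.ext_getElem
  · simp; omega
  · intro i hi hi'
    simp only [List.length_map, List.length_range] at hi'
    simp only [List.getElem_append, List.length_take, List.length_map, List.length_range,
      List.length_replicate, List.getElem_take, List.getElem_map, List.getElem_range,
      List.getElem_replicate, List.getElem_drop]
    split_ifs with hc1 hc2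
    · exact (h1 i (by omega)).symm
    · exact (h2 i (by omega) (by omega)).symm
    · rw [h3 i (by omega) (by omega)]
      congr 1; omega

-- A's slice assignment on a pointwise-described mask
theorem pvSliceAssign (length s e : Int) (g g' : Nat → Bool)
    (h0 : 0 ≤ s) (hse : s ≤ e) (hel : e + 1 ≤ length)
    (hg : ∀ k : Nat, g' k = if s ≤ (k : Int) ∧ (k : Int) ≤ e then true else g k) :
    PySem.List.slice ((List.range length.toNat).map g) none (some s) ++
      (PySem.List.pyRepeat [true] (e + 1 - s) ++
        PySem.List.slice ((List.range length.toNat).map g) (some (e + 1)) none)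
      = (List.range length.toNat).map g' := by
  have ha : s = ((s.toNat : Nat) : Int) := by omega
  have hb : e + 1 = (((e + 1).toNat : Nat) : Int) := by omega
  rw [ha, hb, PySem.List.slice_to_natCast, PySem.List.slice_from_natCast]
  have hrep : PySem.List.pyRepeat [true] ((((e + 1).toNat : Nat) : Int) - ((s.toNat : Nat) : Int))
      = List.replicate ((e + 1).toNat - s.toNat) true := by
    rw [PySem.List.pyRepeat_singleton]; congr 1; omega
  rw [hrep]
  apply pvSplice length.toNat s.toNat (e + 1).toNat (by omega) (by omega)
  · intro i hi; rw [hg i, if_neg (by omega)]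
  · intro i hia hib; rw [hg i, if_pos (by constructor <;> omega)]
  · intro i hib hin; rw [hg i, if_neg (by omega)]

-- A's single-index write on a pointwise-described mask
theorem pvIndexAssign (length v : Int) (g g' : Nat → Bool)
    (h0 : 0 ≤ v) (hv : v + 1 ≤ length)
    (hg : ∀ k : Nat, g' k = if (k : Int) = v then true else g k) :
    PySem.List.pySet? ((List.range length.toNat).map g) v true
      = some ((List.range length.toNat).map g') := by
  have hva : v = ((v.toNat : Nat) : Int) := by omega
  have hlt : v.toNat < ((List.range length.toNat).map g).length := by simp; omega
  rw [hva, PySem.List.pySet?_natCast _ _ _ hlt]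
  congr 1
  apply List.ext_getElem
  · simp
  · intro i hi hi'
    simp only [List.getElem_set, List.getElem_map, List.getElem_range]
    split_ifs with hc
    · subst hc; rw [hg, if_pos hva.symm]
    · rw [hg, if_neg (by omega)]

-- one accepted token keeps the invariant and makes both steps succeed
theorem pvStep_rel (length : Int) (mask : List Bool) (d : List Int) (t : List Char)
    (h : pvTokOK length t = true) (hinv : pvInv length mask d) :
    ∃ mask' d', pvStepA length (some mask) t = some mask' ∧
      pvStepB length (some d) t = some d' ∧ pvInv length mask' d' := by
  obtain ⟨hd, hpos, hmask⟩ := hinv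
  unfold pvTokOK at h
  unfold pvStepA pvStepB
  by_cases hin : PySem.Chars.isIn ['-'] t = true
  · simp only [hin, if_true] at h ⊢
    cases hp0 : PySem.Int.ofChars? ((PySem.Chars.splitOn (PySem.Chars.strip t) ['-']).getD 0 []) with
    | none => rw [hp0] at h; simp at h
    | some s =>
      cases hp1 : PySem.Int.ofChars? ((PySem.Chars.splitOn (PySem.Chars.strip t) ['-']).getD 1 []) with
      | none => rw [hp0, hp1] at h; simp at h
      | some e =>
        rw [hp0, hp1] at h
        simp only [Bool.and_eq_true, beq_iff_eq, decide_eq_true_eq] at h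
        obtain ⟨hlen2, ⟨h0s, hse⟩, hel⟩ := h
        obtain ⟨d', hmk, hlend, hps⟩ := pvMark?_spec d s e length hd h0s hse hel
        have hne : ¬ (e < s) := by omega
        have hne2 : ¬ (length < e + 1) := by omega
        simp only [hlen2, ne_eq, not_true, if_false, gt_iff_lt, if_neg hne, if_neg hne2, hmk]
        have hpt : ∀ k : Nat, (fun k => decide (0 < pvPsum d' k)) k
            = if s ≤ (k : Int) ∧ (k : Int) ≤ e then true else decide (0 < pvPsum d k) := by
          intro k
          simp only
          rw [hps k]
          split_ifs with hc
          · simp only [decide_eq_true_eq]; have := hpos k; omega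
          · simp
        refine ⟨_, d', ?_, rfl, hlend.trans hd, fun k => ?_, rfl⟩
        · rw [hmask, List.append_assoc, pvSliceAssign length s e _ _ h0s hse hel hpt]
        · rw [hps k]; have := hpos k; split_ifs <;> omega
  · simp only [Bool.not_eq_true] at hin
    simp only [hin, Bool.false_eq_true, if_false] at h ⊢
    by_cases ht : t = []
    · exact ⟨mask, d, by simp [ht], by simp [ht], hd, hpos, hmask⟩
    · simp only [ht, if_true, ne_eq, not_false_iff] at h ⊢
      cases hp : PySem.Int.ofChars? t with
      | none => rw [hp] at h; simp at h
      | some v =>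
        rw [hp] at h
        simp only [Bool.and_eq_true, decide_eq_true_eq] at h
        obtain ⟨h0v, hvl⟩ := h
        obtain ⟨d', hmk, hlend, hps⟩ := pvMark?_spec d v v length hd h0v le_rfl hvl
        have hng : ¬ (length < v + 1) := by omega
        simp only [gt_iff_lt, if_neg hng, hmk]
        have hpt : ∀ k : Nat, (fun k => decide (0 < pvPsum d' k)) k
            = if (k : Int) = v then true else decide (0 < pvPsum d k) := by
          intro k
          simp only
          rw [hps k]
          by_cases hkv : (k : Int) = v
          · rw [if_pos ⟨le_of_eq hkv.symm, le_of_eq hkv⟩, if_pos hkv]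
            simp only [decide_eq_true_eq]; have := hpos k; omega
          · rw [if_neg (by omega), if_neg hkv]; simp
        refine ⟨_, d', ?_, rfl, hlend.trans hd, fun k => ?_, rfl⟩
        · rw [hmask]
          exact pvIndexAssign length v _ _ h0v hvl hpt
        · rw [hps k]; have := hpos k; split_ifs <;> omega

theorem pvFold_rel (length : Int) (ts : List (List Char)) (mask : List Bool) (d : List Int)
    (h : ts.all (pvTokOK length) = true) (hinv : pvInv length mask d) :
    ∃ mask' d', ts.foldl (pvStepA length) (some mask) = some mask' ∧
      ts.foldl (pvStepB length) (some d) = some d' ∧ pvInv length mask' d' := by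
  induction ts generalizing mask d with
  | nil => exact ⟨mask, d, rfl, rfl, hinv⟩
  | cons t ts ih =>
    simp only [List.all_cons, Bool.and_eq_true] at h
    obtain ⟨m1, d1, hA, hB, hinv1⟩ := pvStep_rel length mask d t h.1 hinv
    obtain ⟨m2, d2, hA2, hB2, hinv2⟩ := ih m1 d1 h.2 hinv1
    exact ⟨m2, d2, by simp [hA, hA2], by simp [hB, hB2], hinv2⟩

-- the initial state satisfies the invariant
theorem pvInv_init (length : Int) :
    pvInv length (PySem.List.pyRepeat [false] length) (PySem.List.pyRepeat [0] (length + 1)) := by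
  have hps : ∀ k : Nat, pvPsum (PySem.List.pyRepeat [(0 : Int)] (length + 1)) k = 0 := by
    intro k
    unfold pvPsum pvPsum0
    rw [PySem.List.pyRepeat_singleton, List.take_replicate]
    simp
  refine ⟨by rw [PySem.List.pyRepeat_singleton]; simp, fun k => by rw [hps k], ?_⟩
  rw [PySem.List.pyRepeat_singleton]
  simp only [hps, decide_eq_false (by omega : ¬ (0:Int) < 0)]
  symm
  rw [List.eq_replicate_iff]
  exact ⟨by simp, by intro b hb; simp at hb; exact hb.2⟩

-- B's prefix-sum pass computes the pointwise mask of the prefix sums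
theorem pvScan_aux (d : List Int) (n : Nat) :
    ((List.range n).map (fun (k : Nat) => ((0 : Int) + (k : Int)))).foldl
      (fun (st : Int × List Bool) i =>
        let r := st.1 + PySem.List.pyGetD d i 0
        (r, st.2 ++ [decide (r > 0)])) ((0 : Int), ([] : List Bool))
    = (pvPsum0 d n, (List.range n).map (fun k => decide (0 < pvPsum d k))) := by
  induction n with
  | zero => simp [pvPsum0]
  | succ n ih =>
    rw [List.range_succ, List.map_append, List.foldl_append, ih]
    simp only [List.map_cons, List.map_nil, List.foldl_cons, List.foldl_nil, zero_add,
      PySem.List.pyGetD_natCast, List.map_append]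
    simp only [pvPsum, pvPsum0_succ, gt_iff_lt]

theorem pvScan (d : List Int) (length : Int) :
    ((PySem.List.pyRange 0 length 1).foldl
      (fun (st : Int × List Bool) i =>
        let r := st.1 + PySem.List.pyGetD d i 0
        (r, st.2 ++ [decide (r > 0)])) ((0 : Int), ([] : List Bool))).2
    = (List.range length.toNat).map (fun k => decide (0 < pvPsum d k)) := by
  rw [PySem.List.pyRange_one]
  have h : (length - 0).toNat = length.toNat := by omega
  rw [h, pvScan_aux]

-- ===== VERDICT (by name: the statement is the Claim_ definition above) =====
theorem rangestring_to_mask_spec : Claim_equal_rangestring_to_mask := by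
  intro rangestring length hdom hpre
  unfold Spec_rangestring_to_mask
  unfold Pre_rangestring_to_mask at hpre
  obtain ⟨mask', d', hA, hB, hd', hpos', hmask'⟩ :=
    pvFold_rel length (PySem.Chars.splitOn rangestring.toList [','])
      (PySem.List.pyRepeat [false] length) (PySem.List.pyRepeat [0] (length + 1))
      hpre (pvInv_init length)
  have halt : rangestring_to_mask_alt rangestring length
      = (List.range length.toNat).map (fun k => decide (0 < pvPsum d' k)) := by
    unfold rangestring_to_mask_alt
    rw [hB]
    exact pvScan d' length
  rw [halt]
  unfold rangestring_to_mask
  by_cases hr : rangestring = ""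
  · subst hr
    simp only [if_pos]
    have htoks : PySem.Chars.splitOn ("" : String).toList [','] = [([] : List Char)] := by decide
    rw [htoks] at hB
    have hstepB : pvStepB length (some (PySem.List.pyRepeat [(0 : Int)] (length + 1))) []
        = some (PySem.List.pyRepeat [(0 : Int)] (length + 1)) := by
      simp [pvStepB, (by decide : PySem.Chars.isIn ['-'] ([] : List Char) = false)]
    simp only [List.foldl_cons, List.foldl_nil, hstepB, Option.some.injEq] at hB
    rw [← hB]
    exact (pvInv_init length).2.2
  · simp only [if_neg hr]
    rw [hA, Option.getD_some, hmask']
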